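-- pv_equiv track=rewrite | github.com/alfredo-pasquel/audio-midi-preprocess | process_cues.py | trim_common_prefix
-- ===== SOURCE A (Python) =====
-- def longest_common_prefix(tokens_list):
--     if not tokens_list:
--         return []
--     min_len = min(len(tokens) for tokens in tokens_list)
--     common = []
--     for i in range(min_len):
--         token = tokens_list[0][i]
--         if all(tokens[i] == token for tokens in tokens_list):
--             common.append(token)
--         else:
--             break
--     return common
--
-- def trim_common_prefix(names):
--     if not names:
--         return names
--     token_lists = [name.split() for name in names]
--     common_tokens = longest_common_prefix(token_lists)
--     common_prefix = " ".join(common_tokens)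
--     trimmed = []
--     if common_prefix:
--         for name in names:
--             if name.startswith(common_prefix):
--                 trimmed.append(name[len(common_prefix):].strip())
--             else:
--                 trimmed.append(name)
--     else:
--         trimmed = names
--     return trimmed
-- ===== SOURCE B (Python) =====
-- def trim_common_prefix(names):
--     if not names:
--         return names
--     # Fold a pairwise word-LCP across the token lists instead of scanning columns.
--     common = names[0].split()
--     for name in names[1:]:
--         tokens = name.split()
--         k = 0
--         while k < len(common) and k < len(tokens) and common[k] == tokens[k]:
--             k += 1
--         common = common[:k]
--     prefix = " ".join(common)
--     if not prefix:
--         return names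
--     return [name[len(prefix):].strip() if name.startswith(prefix) else name
--             for name in names]
-- ===== Notes on version B (the rewrite author's own statement) =====
-- stated objective: alternative
-- what changed: Replaces the column-index scan (min length, then all() over every list per column) by a running pairwise word-LCP folded once over the names, and builds the trimmed output with a comprehension instead of an append loop.
import Mathlib
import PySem

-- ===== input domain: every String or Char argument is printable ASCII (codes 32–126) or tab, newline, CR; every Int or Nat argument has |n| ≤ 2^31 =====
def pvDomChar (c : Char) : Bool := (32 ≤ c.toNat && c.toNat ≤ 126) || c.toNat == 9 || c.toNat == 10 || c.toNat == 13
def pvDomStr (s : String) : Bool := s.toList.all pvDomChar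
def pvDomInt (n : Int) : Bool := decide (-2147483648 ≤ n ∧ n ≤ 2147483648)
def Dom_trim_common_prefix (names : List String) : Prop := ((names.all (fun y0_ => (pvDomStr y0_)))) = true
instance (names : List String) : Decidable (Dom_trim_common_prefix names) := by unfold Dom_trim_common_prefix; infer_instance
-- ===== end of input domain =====

-- B replaces A's column-index LCP scan (min length + all() per column) by a pairwise
-- word-LCP folded once across the names, and builds the output by a comprehension (map);
-- alternative decomposition, same asymptotic cost.

-- ===== PORT A =====
-- the loop 'for i in range(min_len): … break' of longest_common_prefix;
-- tokens_list[0][i] and tokens[i] are in range whenever read (i < min_len), so getD is exact there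
def longest_common_prefix_go (tl : List (List String)) (t0 : List String) (minLen i : Nat) : List String :=
  if h : i < minLen then
    let token := t0.getD i ""
    if tl.all (fun tokens => tokens.getD i "" == token) then
      token :: longest_common_prefix_go tl t0 minLen (i + 1)
    else []
  else []
  termination_by minLen - i
  decreasing_by omega

def longest_common_prefix (tokens_list : List (List String)) : List String :=
  match tokens_list with
  | [] => []
  | t0 :: rest =>
    -- min(len(tokens) for tokens in tokens_list): minimum of the lengths, first as seed
    let minLen := rest.foldl (fun m ts => min m ts.length) t0.length
    longest_common_prefix_go (t0 :: rest) t0 minLen 0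

def trim_common_prefix (names : List String) : List String :=
  if names = [] then names
  else
    let token_lists := names.map PySem.Str.split₀
    let common_tokens := longest_common_prefix token_lists
    let common_prefix := PySem.Str.join " " common_tokens
    if common_prefix ≠ "" then
      -- the append loop building 'trimmed'
      names.foldl (fun trimmed name =>
        if PySem.Str.startswith name common_prefix then
          trimmed ++ [PySem.Str.strip (PySem.Str.slice name (some (PySem.Str.len common_prefix)) none)]
        else
          trimmed ++ [name]) []
    else names

-- ===== PORT B =====
-- Source B's inner 'while k < len(common) and k < len(tokens) and common[k] == tokens[k]: k += 1';
-- common[k]/tokens[k] are in range whenever compared (k < both lengths), so getD is exact there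
def pvWhileK (common tokens : List String) (k : Nat) : Nat :=
  if h : k < common.length ∧ k < tokens.length ∧ common.getD k "" == tokens.getD k "" then
    pvWhileK common tokens (k + 1)
  else k
  termination_by common.length - k
  decreasing_by omega

def trim_common_prefix_alt (names : List String) : List String :=
  match names with
  | [] => names
  | n0 :: rest =>
    let common := rest.foldl (fun common name =>
      let tokens := PySem.Str.split₀ name
      -- common[:k] with 0 ≤ k is List.take k
      common.take (pvWhileK common tokens 0)) (PySem.Str.split₀ n0)
    let pfx := PySem.Str.join " " common
    if pfx = "" then names
    else
      names.map (fun name =>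
        if PySem.Str.startswith name pfx then
          PySem.Str.strip (PySem.Str.slice name (some (PySem.Str.len pfx)) none)
        else name)

-- ===== PRECONDITION & SPEC =====
def Spec_trim_common_prefix (names : List String) (out : List String) : Prop := out = trim_common_prefix_alt names
instance (names : List String) (out : List String) : Decidable (Spec_trim_common_prefix names out) := by unfold Spec_trim_common_prefix; infer_instance

-- ===== CLAIM (what is proved, stated in full; the proofs are below) =====
def Claim_equal_trim_common_prefix : Prop := ∀ (names : List String), Dom_trim_common_prefix names → Spec_trim_common_prefix names (trim_common_prefix names)

-- ===== LEMMAS AND PROOFS =====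

-- structural pairwise word-LCP (proof-side characterisation of B's while loop)
def lcp2 : List String → List String → List String
  | x :: xs, y :: ys => if x == y then x :: lcp2 xs ys else []
  | _, _ => []

-- proof-side characterisation of A's column scan: simultaneous structural scan of all lists
def loopGo : List String → List (List String) → List String
  | [], _ => []
  | x :: xs, rest =>
    if rest.all (fun l => l.head? == some x) then
      x :: loopGo xs (rest.map List.tail)
    else []

lemma lcp2_nil_left (b : List String) : lcp2 [] b = [] := by
  cases b <;> rfl

lemma lcp2_nil_right (a : List String) : lcp2 a [] = [] := by
  cases a <;> rfl

lemma whileK_eq (common tokens : List String) :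
    ∀ (n k : Nat), common.length - k ≤ n →
      pvWhileK common tokens k = k + (lcp2 (common.drop k) (tokens.drop k)).length := by
  intro n
  induction n with
  | zero =>
    intro k hk
    rw [pvWhileK, dif_neg (by omega)]
    rw [show common.drop k = [] from List.drop_eq_nil_iff.mpr (by omega), lcp2_nil_left]
    simp
  | succ n ih =>
    intro k hk
    rw [pvWhileK]
    by_cases h : k < common.length ∧ k < tokens.length ∧ common.getD k "" == tokens.getD k ""
    · rw [dif_pos h]
      obtain ⟨h1, h2, h3⟩ := h
      rw [ih (k + 1) (by omega)]
      rw [List.drop_eq_getElem_cons h1, List.drop_eq_getElem_cons h2]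
      have heq : common[k] = tokens[k] := by
        rwa [List.getD_eq_getElem _ _ h1, List.getD_eq_getElem _ _ h2, beq_iff_eq] at h3
      simp only [lcp2, heq, beq_self_eq_true, if_true, List.length_cons]
      omega
    · rw [dif_neg h]
      by_cases h1 : k < common.length
      · by_cases h2 : k < tokens.length
        · have h3 : ¬(common.getD k "" == tokens.getD k "") = true := fun hc => h ⟨h1, h2, hc⟩
          rw [List.drop_eq_getElem_cons h1, List.drop_eq_getElem_cons h2]
          have hne : ¬(common[k] == tokens[k]) = true := by
            rw [List.getD_eq_getElem _ _ h1, List.getD_eq_getElem _ _ h2] at h3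
            exact h3
          simp only [lcp2, if_neg hne]
          simp
        · rw [show tokens.drop k = [] from List.drop_eq_nil_iff.mpr (by omega), lcp2_nil_right]
          simp
      · rw [show common.drop k = [] from List.drop_eq_nil_iff.mpr (by omega), lcp2_nil_left]
        simp

lemma lcp2_prefix : ∀ (a b : List String), lcp2 a b <+: a := by
  intro a
  induction a with
  | nil => intro b; rw [lcp2_nil_left]
  | cons x xs ih =>
    intro b
    cases b with
    | nil => rw [lcp2_nil_right]; exact List.nil_prefix
    | cons y ys =>
      simp only [lcp2]
      split
      · exact List.cons_prefix_cons.mpr ⟨rfl, ih ys⟩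
      · exact List.nil_prefix

lemma take_whileK (a b : List String) : a.take (pvWhileK a b 0) = lcp2 a b := by
  rw [whileK_eq a b a.length 0 (by omega)]
  simp only [List.drop_zero, Nat.zero_add]
  exact (List.prefix_iff_eq_take.mp (lcp2_prefix a b)).symm

lemma loopGo_nil_of_mem (l0 : List String) (rest : List (List String)) (h : [] ∈ rest) :
    loopGo l0 rest = [] := by
  cases l0 with
  | nil => rfl
  | cons x xs =>
    simp only [loopGo]
    rw [if_neg]
    intro hall
    have := List.all_eq_true.mp hall _ h
    simp at this

lemma loopGo_pair : ∀ (a b : List String) (t : List (List String)),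
    loopGo a (b :: t) = loopGo (lcp2 a b) t := by
  intro a
  induction a with
  | nil => intro b t; rw [lcp2_nil_left]; rfl
  | cons x xs ih =>
    intro b t
    cases b with
    | nil =>
      rw [lcp2_nil_right]
      simp only [loopGo, List.all_cons, List.head?_nil]
      rw [if_neg (by simp)]
    | cons y ys =>
      by_cases hxy : x = y
      · subst hxy
        have hl : lcp2 (x :: xs) (x :: ys) = x :: lcp2 xs ys := by simp [lcp2]
        rw [hl]
        simp only [loopGo, List.all_cons, List.head?_cons, beq_self_eq_true, Bool.true_and,
          List.map_cons, List.tail_cons]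
        by_cases hall : (t.all fun l => l.head? == some x) = true
        · rw [if_pos hall, if_pos hall]
          exact congrArg (x :: ·) (ih ys (t.map List.tail))
        · rw [if_neg hall, if_neg hall]
      · have hl : lcp2 (x :: xs) (y :: ys) = [] := by simp [lcp2, hxy]
        rw [hl]
        simp only [loopGo, List.all_cons, List.head?_cons]
        have hc : ¬((some y == some x && t.all fun l => l.head? == some x) = true) := by
          intro hall
          simp only [Bool.and_eq_true, beq_iff_eq, Option.some.injEq] at hall
          exact hxy hall.1.symm
        rw [if_neg hc]

lemma loopGo_single (a : List String) : loopGo a [] = a := by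
  induction a with
  | nil => rfl
  | cons x xs ih => simp [loopGo, ih]

lemma loopGo_foldl : ∀ (t : List (List String)) (h : List String),
    loopGo h t = t.foldl lcp2 h := by
  intro t
  induction t with
  | nil => intro h; exact loopGo_single h
  | cons b t ih =>
    intro h
    rw [loopGo_pair, ih, List.foldl_cons]

lemma foldl_min_le (l : List Nat) (a : Nat) :
    l.foldl min a ≤ a ∧ ∀ x ∈ l, l.foldl min a ≤ x := by
  induction l generalizing a with
  | nil => simp
  | cons b l ih =>
    obtain ⟨h1, h2⟩ := ih (min a b)
    refine ⟨le_trans h1 (by omega), ?_⟩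
    intro x hx
    rcases List.mem_cons.mp hx with h | h
    · subst h; exact le_trans h1 (by omega)
    · exact h2 x h

lemma foldl_min_mem (l : List Nat) (a : Nat) :
    l.foldl min a = a ∨ l.foldl min a ∈ l := by
  induction l generalizing a with
  | nil => simp
  | cons b l ih =>
    rcases ih (min a b) with h | h
    · rcases Nat.le_total a b with hab | hab
      · left; rw [List.foldl_cons, h]; omega
      · right; rw [List.foldl_cons, h]; simp [Nat.min_eq_right hab]
    · right; exact List.mem_cons_of_mem _ h

lemma go_eq_loopGo (t0 : List String) (rest : List (List String)) :
    ∀ (i : Nat),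
    longest_common_prefix_go (t0 :: rest) t0
      (rest.foldl (fun m ts => min m ts.length) t0.length) i
    = loopGo (t0.drop i) (rest.map (List.drop i)) := by
  set m := rest.foldl (fun m ts => min m ts.length) t0.length with hm
  have hfold : m = (rest.map List.length).foldl min t0.length := by
    rw [hm, List.foldl_map]
  have hle : m ≤ t0.length ∧ ∀ ts ∈ rest, m ≤ ts.length := by
    obtain ⟨h1, h2⟩ := foldl_min_le (rest.map List.length) t0.length
    rw [← hfold] at h1 h2
    exact ⟨h1, fun ts hts => h2 _ (List.mem_map_of_mem hts)⟩
  have hbig : ∀ i, m ≤ i → loopGo (t0.drop i) (rest.map (List.drop i)) = [] := by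
    intro i hi
    rcases foldl_min_mem (rest.map List.length) t0.length with h | h
    · rw [← hfold] at h
      rw [List.drop_eq_nil_iff.mpr (by omega)]
      rfl
    · rw [← hfold] at h
      obtain ⟨ts, hts, hlen⟩ := List.mem_map.mp h
      exact loopGo_nil_of_mem _ _
        (List.mem_map.mpr ⟨ts, hts, List.drop_eq_nil_iff.mpr (by omega)⟩)
  have H : ∀ (n i : Nat), m - i ≤ n →
      longest_common_prefix_go (t0 :: rest) t0 m i = loopGo (t0.drop i) (rest.map (List.drop i)) := by
    intro n
    induction n with
    | zero =>
      intro i hi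
      rw [longest_common_prefix_go, dif_neg (by omega), hbig i (by omega)]
    | succ n ih =>
      intro i hi
      rw [longest_common_prefix_go]
      by_cases hilt : i < m
      · rw [dif_pos hilt]
        show (if ((t0 :: rest).all (fun tokens => tokens.getD i "" == t0.getD i "")) = true then
            t0.getD i "" :: longest_common_prefix_go (t0 :: rest) t0 m (i + 1) else [])
          = loopGo (t0.drop i) (rest.map (List.drop i))
        have hi0 : i < t0.length := by omega
        have hir : ∀ ts ∈ rest, i < ts.length := fun ts hts => by
          have := hle.2 ts hts; omega
        have htok : t0.getD i "" = t0[i] := List.getD_eq_getElem _ _ hi0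
        have hpt : ∀ ts ∈ rest,
            (ts.getD i "" == t0.getD i "") = ((ts.drop i).head? == some t0[i]) := by
          intro ts hts
          have hi' := hir ts hts
          rw [List.head?_drop, List.getElem?_eq_getElem hi',
            List.getD_eq_getElem _ _ hi', htok]
          simp
        have hcond : ((t0 :: rest).all (fun tokens => tokens.getD i "" == t0.getD i ""))
            = ((rest.map (List.drop i)).all (fun l => l.head? == some t0[i])) := by
          simp only [List.all_cons, beq_self_eq_true, Bool.true_and, List.all_map]
          rw [Bool.eq_iff_iff]
          simp only [List.all_eq_true, Function.comp_apply]
          constructor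
          · intro hA ts hts; rw [← hpt ts hts]; exact hA ts hts
          · intro hB ts hts; rw [hpt ts hts]; exact hB ts hts
        have hdrop0 : t0.drop i = t0[i] :: t0.drop (i + 1) := List.drop_eq_getElem_cons hi0
        rw [hdrop0]
        simp only [loopGo]
        have htails : (rest.map (List.drop i)).map List.tail = rest.map (List.drop (i + 1)) := by
          rw [List.map_map]
          apply List.map_congr_left
          intro ts _
          exact List.tail_drop
        rw [htails, ← hcond]
        by_cases hall : ((t0 :: rest).all (fun tokens => tokens.getD i "" == t0.getD i "")) = true
        · rw [if_pos hall, if_pos hall, htok, ih (i + 1) (by omega)]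
        · rw [if_neg hall, if_neg hall]
      · rw [dif_neg hilt, hbig i (by omega)]
  intro i
  exact H (m - i) i (le_refl _)

lemma lcpA_eq (t0 : List String) (rest : List (List String)) :
    longest_common_prefix (t0 :: rest) = rest.foldl lcp2 t0 := by
  show longest_common_prefix_go (t0 :: rest) t0
      (rest.foldl (fun m ts => min m ts.length) t0.length) 0 = rest.foldl lcp2 t0
  rw [go_eq_loopGo t0 rest 0]
  have h2 : rest.map (List.drop 0) = rest := by
    rw [show (List.drop 0 : List String → List String) = id from funext fun l => List.drop_zero,
      List.map_id]
  rw [List.drop_zero, h2]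
  exact loopGo_foldl rest t0

-- ===== VERDICT (by name: the statement is the Claim_ definition above) =====
theorem trim_common_prefix_spec : Claim_equal_trim_common_prefix := by
  intro names _
  unfold Spec_trim_common_prefix
  cases names with
  | nil => rfl
  | cons n0 rest =>
    simp only [trim_common_prefix, trim_common_prefix_alt]
    rw [if_neg (by simp : ¬(n0 :: rest = []))]
    have hcommon : longest_common_prefix ((n0 :: rest).map PySem.Str.split₀)
        = rest.foldl (fun common name =>
            common.take (pvWhileK common (PySem.Str.split₀ name) 0)) (PySem.Str.split₀ n0) := by
      rw [List.map_cons, lcpA_eq, List.foldl_map]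
      congr 1
      funext c name
      exact (take_whileK c (PySem.Str.split₀ name)).symm
    rw [hcommon]
    set ct := rest.foldl (fun common name =>
        common.take (pvWhileK common (PySem.Str.split₀ name) 0)) (PySem.Str.split₀ n0) with hct
    set p := PySem.Str.join " " ct with hp
    by_cases hpe : p = ""
    · rw [if_neg (by simp [hpe]), if_pos hpe]
    · rw [if_pos hpe, if_neg hpe]
      have hbody : (fun (trimmed : List String) (name : String) =>
            if PySem.Str.startswith name p = true then
              trimmed ++ [PySem.Str.strip (PySem.Str.slice name (some (PySem.Str.len p)) none)]
            else trimmed ++ [name])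
          = (fun trimmed name => trimmed ++
              [if PySem.Str.startswith name p = true then
                 PySem.Str.strip (PySem.Str.slice name (some (PySem.Str.len p)) none)
               else name]) := by
        funext acc x
        split <;> rfl
      rw [hbody, PySem.List.foldl_append_singleton_eq_map]
      simp
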